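-- pv_equiv track=rewrite | github.com/HenryChinask1/AdventOfCode | 2018/2018day5.py | partOne
-- ===== SOURCE A (Python) =====
-- def partOne(part):
--     newPart = []
--     i = 0
--
--     while i < len(part):
--         if newPart and abs(ord(part[i]) - ord(newPart[-1])) == 32:
--             newPart.pop()
--             i += 1
--         else:
--             newPart.append(part[i])
--             i += 1
--     return newPart
-- ===== SOURCE B (Python) =====
-- def partOne(part):
--     lst = list(part)
--     i = 0
--     while i + 1 < len(lst):
--         if abs(ord(lst[i]) - ord(lst[i + 1])) == 32:
--             del lst[i:i + 2]
--             i = 0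
--         else:
--             i += 1
--     return lst
-- ===== Notes on version B (the rewrite author's own statement) =====
-- stated objective: alternative
-- what changed: Replaces the one-pass stack reduction with repeated left-to-right scans that delete the first adjacent reacting pair and restart until no pair remains; Pre_ excludes lists with multi-character elements (ord raises TypeError on most of these, and where A still returns it is only because evaluation order happened to skip every ord call).
-- outside the precondition, e.g. on partOne(['a', 'A', 'xx']): A returns ['xx'], B returns ['xx']
import Mathlib
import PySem

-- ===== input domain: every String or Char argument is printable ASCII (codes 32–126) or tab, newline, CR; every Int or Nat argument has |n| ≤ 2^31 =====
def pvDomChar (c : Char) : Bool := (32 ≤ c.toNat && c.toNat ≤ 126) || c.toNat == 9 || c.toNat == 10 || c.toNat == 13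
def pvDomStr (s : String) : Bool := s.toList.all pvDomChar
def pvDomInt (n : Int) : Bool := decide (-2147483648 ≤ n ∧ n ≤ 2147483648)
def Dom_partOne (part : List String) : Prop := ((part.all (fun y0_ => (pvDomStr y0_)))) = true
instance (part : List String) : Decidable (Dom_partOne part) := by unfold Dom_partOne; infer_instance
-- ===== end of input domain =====

-- B replaces the single stack pass with repeated scans deleting the first adjacent
-- reacting pair until none remains (alternative decomposition, same exact result);
-- equality is proved for all inputs (both ports read ord of a non-single-character
-- string as 0; on the inputs where Python actually evaluates ord of such an element,
-- both Pythons raise TypeError, so nothing is claimed about their values there).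

-- ord(s) of a length-1 string; 0 for other strings, where Python's ord raises TypeError
def pyOrd (s : String) : Nat :=
  match s.toList with
  | [c] => c.toNat
  | _ => 0

-- abs(ord a - ord b) == 32, the reaction test used by both programs
def reacts (a b : String) : Bool := ((pyOrd a : Int) - (pyOrd b : Int)).natAbs == 32

-- ===== PORT A =====
-- the while loop over i with accumulator newPart, transliterated as recursion on the rest of part
def partOneLoop (newPart : List String) (rest : List String) : List String :=
  match rest with
  | [] => newPart
  | c :: cs =>
    match newPart.getLast? with            -- `if newPart and abs(ord(part[i]) - ord(newPart[-1])) == 32`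
    | some t =>
      if reacts c t then partOneLoop newPart.dropLast cs   -- newPart.pop()
      else partOneLoop (newPart ++ [c]) cs                 -- newPart.append(part[i])
    | none => partOneLoop (newPart ++ [c]) cs

def partOne (part : List String) : List String := partOneLoop [] part

-- ===== PORT B =====
-- one left-to-right scan: delete the first adjacent reacting pair, none if irreducible
def scanDel (l : List String) : Option (List String) :=
  match l with
  | a :: b :: rest => if reacts a b then some rest else (scanDel (b :: rest)).map (a :: ·)
  | _ => none

-- used by reduceLoop for termination
theorem scanDel_length : ∀ (l l' : List String), scanDel l = some l' → l'.length < l.length := by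
  intro l
  induction l with
  | nil => intro l' h; simp [scanDel] at h
  | cons a t ih =>
    intro l' h
    match t with
    | [] => simp [scanDel] at h
    | b :: rest =>
      simp only [scanDel] at h
      by_cases hr : reacts a b
      · simp [hr] at h
        subst h
        simp
      · simp [hr] at h
        obtain ⟨m, hm, hl'⟩ := h
        have := ih m hm
        subst hl'
        simp at this ⊢
        omega

-- the while loop of B: rescan from the start after each deletion, stop when no pair remains
def reduceLoop (l : List String) : List String :=
  match h : scanDel l with
  | some l' => reduceLoop l'
  | none => l
termination_by l.length
decreasing_by exact scanDel_length l _ h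

def partOne_alt (part : List String) : List String := reduceLoop part

-- ===== PRECONDITION & SPEC =====
-- Pre_ admits lists of single-character strings and trivial (length ≤ 1) lists; Python's ord
-- raises TypeError on longer strings, so A raises on most other inputs — except a few where
-- every ord call happens to be skipped (the stack is empty when each bad element arrives and
-- it is last), an accident of evaluation order excluded here; B returns the same value there.
def Pre_partOne (part : List String) : Prop := (∀ s ∈ part, s.length = 1) ∨ part.length ≤ 1
instance (part : List String) : Decidable (Pre_partOne part) := by unfold Pre_partOne; infer_instance
def pvWitness_partOne : List String := ["d", "a", "b", "B", "A", "c"]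

def Spec_partOne (part : List String) (out : List String) : Prop := out = partOne_alt part
instance (part : List String) (out : List String) : Decidable (Spec_partOne part out) := by unfold Spec_partOne; infer_instance

-- ===== CLAIM (what is proved, stated in full; the proofs are below) =====
def Claim_equal_partOne : Prop := ∀ (part : List String), Dom_partOne part → Pre_partOne part → Spec_partOne part (partOne part)

-- ===== LEMMAS AND PROOFS =====

-- no adjacent reacting pair
def Ok (a b : String) : Prop := reacts a b = false

theorem reacts_comm (a b : String) : reacts a b = reacts b a := by
  simp only [reacts]
  rw [show ((pyOrd a : Int) - (pyOrd b : Int)).natAbs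
      = ((pyOrd b : Int) - (pyOrd a : Int)).natAbs by omega]

-- the stack step, with the stack kept top-first (the reverse of A's newPart)
def step (s : List String) (c : String) : List String :=
  match s with
  | [] => [c]
  | t :: ts => if reacts c t then ts else c :: t :: ts

theorem partOneLoop_eq_foldl : ∀ (rest s : List String),
    partOneLoop s.reverse rest = (List.foldl step s rest).reverse := by
  intro rest
  induction rest with
  | nil => intro s; simp [partOneLoop]
  | cons c cs ih =>
    intro s
    match s with
    | [] =>
      simp only [List.reverse_nil, partOneLoop, List.getLast?_nil, List.nil_append,
        List.foldl_cons, step]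
      have := ih [c]
      simpa using this
    | t :: ts =>
      simp only [List.reverse_cons, partOneLoop, List.getLast?_concat, List.foldl_cons, step]
      by_cases hr : reacts c t
      · simp only [hr, if_true, List.dropLast_concat]
        exact ih ts
      · simp only [hr]
        have := ih (c :: t :: ts)
        simpa using this

theorem foldl_irred : ∀ (u s : List String), List.IsChain Ok (s.reverse ++ u) →
    List.foldl step s u = u.reverse ++ s := by
  intro u
  induction u with
  | nil => intro s _; simp
  | cons c cs ih =>
    intro s hch
    match s with
    | [] =>
      simp only [List.foldl_cons, step]
      have := ih [c] (by simpa using hch)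
      simp [this]
    | t :: ts =>
      have hlist : ts.reverse ++ [t] ++ c :: cs = ts.reverse ++ t :: c :: cs := by simp
      rw [List.reverse_cons, hlist] at hch
      have h2 : List.IsChain Ok (t :: c :: cs) := (List.isChain_append.mp hch).2.1
      have htc : Ok t c := (List.isChain_cons_cons.mp h2).1
      have hct : reacts c t = false := by rw [reacts_comm]; exact htc
      simp only [List.foldl_cons, step, hct]
      have hch' : List.IsChain Ok ((c :: t :: ts).reverse ++ cs) := by
        simpa using hch
      have := ih (c :: t :: ts) hch'
      simp [this]

theorem scanDel_none_chain : ∀ (l : List String), scanDel l = none → List.IsChain Ok l := by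
  intro l
  induction l with
  | nil => intro _; simp
  | cons a t ih =>
    intro hnone
    match t with
    | [] => simp
    | b :: rest =>
      have h := hnone
      simp only [scanDel] at h
      by_cases hr : reacts a b
      · simp [hr] at h
      · rw [if_neg hr, Option.map_eq_none_iff] at h
        exact List.isChain_cons_cons.mpr ⟨by simpa using hr, ih h⟩

theorem scanDel_decomp : ∀ (l l' : List String), scanDel l = some l' →
    ∃ u a b v, l = u ++ a :: b :: v ∧ l' = u ++ v ∧ reacts a b = true ∧
      List.IsChain Ok (u ++ [a]) := by
  intro l
  induction l with
  | nil => intro l' h; simp [scanDel] at h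
  | cons a t ih =>
    intro l' h
    match t with
    | [] => simp [scanDel] at h
    | b :: rest =>
      simp only [scanDel] at h
      by_cases hr : reacts a b
      · simp only [hr, if_true, Option.some.injEq] at h
        exact ⟨[], a, b, rest, by simp, by simp [h], hr, by simp⟩
      · simp [hr] at h
        obtain ⟨m, hm, hl'⟩ := h
        obtain ⟨u, x, y, v, he, hm', hxy, hch⟩ := ih m hm
        refine ⟨a :: u, x, y, v, by simp [he], by simp [← hl', hm'], hxy, ?_⟩
        refine List.isChain_cons.mpr ⟨?_, hch⟩
        intro z hz
        have hhead : (u ++ [x]).head? = some b := by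
          match u, he with
          | [], he => simp_all
          | w :: u', he => simp at he; simp [he.1]
        simp only [List.append_eq] at hz
        rw [hhead] at hz
        simp at hz
        subst hz
        unfold Ok
        simpa using hr

theorem foldl_step_del (u v : List String) (a b : String)
    (hr : reacts a b = true) (hch : List.IsChain Ok (u ++ [a])) :
    List.foldl step [] (u ++ a :: b :: v) = List.foldl step [] (u ++ v) := by
  have hchu : List.IsChain Ok u := (List.isChain_append.mp hch).1
  have hu : List.foldl step [] u = u.reverse := by
    have := foldl_irred u [] (by simpa using hchu)
    simpa using this
  have hstepa : step u.reverse a = a :: u.reverse := by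
    match hrev : u.reverse with
    | [] => simp [step]
    | t :: ts =>
      have hlast : u.getLast? = some t := by
        rw [← List.head?_reverse, hrev]; rfl
      have hta : Ok t a := by
        have := (List.isChain_append.mp hch).2.2
        exact this t hlast a rfl
      have hat : reacts a t = false := by rw [reacts_comm]; exact hta
      simp [step, hat]
  have hstepb : step (a :: u.reverse) b = u.reverse := by
    have hba : reacts b a = true := by rw [reacts_comm]; exact hr
    simp [step, hba]
  rw [List.foldl_append, List.foldl_append, hu, List.foldl_cons, List.foldl_cons,
    hstepa, hstepb]

theorem reduceLoop_eq : ∀ (l : List String), reduceLoop l = (List.foldl step [] l).reverse := by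
  intro l
  induction l using reduceLoop.induct with
  | case1 l l' h ih =>
    rw [reduceLoop]
    split
    · next x hx =>
        rw [h] at hx
        injection hx with hx
        subst hx
        rw [ih]
        obtain ⟨u, a, b, v, he, hl', hr, hch⟩ := scanDel_decomp l l' h
        rw [he, hl', foldl_step_del u v a b hr hch]
    · next hx => rw [h] at hx; cases hx
  | case2 l h =>
    rw [reduceLoop]
    split
    · next x hx => rw [h] at hx; cases hx
    · next hx =>
        have hch := scanDel_none_chain l h
        have hi := foldl_irred l [] (by simpa using hch)
        simp [hi]

-- ===== VERDICT (by name: the statement is the Claim_ definition above) =====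
theorem partOne_spec : Claim_equal_partOne := by
  intro part _ _
  unfold Spec_partOne partOne partOne_alt
  have hA : partOneLoop [] part = (List.foldl step [] part).reverse := by
    have := partOneLoop_eq_foldl part []
    simpa using this
  rw [hA, reduceLoop_eq]
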